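-- pv_equiv track=rewrite | github.com/malinkang/GitHubPoster | github_heatmap/utils.py | reduce_year_list
-- ===== SOURCE A (Python) =====
-- def reduce_year_list(year_list, tracks_dict):
--     """
--     format year list
--     [2012, 2013, 2014, 2015, 2016]
--     if 2012, 2013 values are 0
--     year list to [2013, 2015, 2016]
--     """
--     year_list_keys = list(tracks_dict.keys())
--     year_list_keys.sort()
--     s = set()
--     for key in year_list_keys:
--         if tracks_dict.get(key, 0) > 0:
--             s.add(key[:4])
--     year_list.sort()
--     i = 0
--     for year in year_list:
--         if str(year) not in s:
--             i += 1
--         else: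
--             break
--     return year_list[i:]
-- ===== SOURCE B (Python) =====
-- def reduce_year_list(year_list, tracks_dict):
--     year_list.sort()
--     n = len(year_list)
--     pos = {}
--     for idx, year in enumerate(year_list):
--         s = str(year)
--         if s not in pos:
--             pos[s] = idx
--     cut = n
--     for key, value in tracks_dict.items():
--         if value > 0:
--             cut = min(cut, pos.get(key[:4], n))
--     return year_list[cut:]
-- ===== Notes on version B (the rewrite author's own statement) =====
-- stated objective: alternative
-- what changed: Inverts the join: no key sort and no present-prefix set; B builds a first-position index str(year)->index over the sorted years once, then takes the minimum indexed position over the positive-valued dict items and slices there, instead of A's membership set plus leading count-and-break scan.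
import Mathlib
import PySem

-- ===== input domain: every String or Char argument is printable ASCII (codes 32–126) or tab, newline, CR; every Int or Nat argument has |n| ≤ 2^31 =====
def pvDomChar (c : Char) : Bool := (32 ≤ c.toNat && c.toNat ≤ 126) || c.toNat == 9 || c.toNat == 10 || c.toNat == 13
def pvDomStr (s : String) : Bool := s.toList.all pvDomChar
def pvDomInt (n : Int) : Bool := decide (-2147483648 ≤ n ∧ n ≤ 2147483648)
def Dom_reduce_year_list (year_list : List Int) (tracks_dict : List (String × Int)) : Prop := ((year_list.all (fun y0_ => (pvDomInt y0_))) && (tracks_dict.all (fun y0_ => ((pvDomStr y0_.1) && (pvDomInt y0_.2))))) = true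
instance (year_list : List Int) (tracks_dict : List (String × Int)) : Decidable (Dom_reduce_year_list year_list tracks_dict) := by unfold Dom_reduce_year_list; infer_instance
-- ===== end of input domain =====

-- B inverts the join: no key sort and no prefix set; it builds a first-position index of
-- str(year) over the sorted years, takes the minimal indexed position over the positive
-- dict items and slices there (alternative algorithm, similar cost).  Both A and B sort
-- year_list in place in Python; the equivalence proved here is about the RETURN value.

-- ===== PORT A =====
-- dict.get(key, dflt) on the association list: first match (exact for the dict convention)
def rylGet (d : List (String × Int)) (k : String) (dflt : Int) : Int :=
  match d.find? (fun p => p.1 == k) with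
  | some p => p.2
  | none => dflt

-- list(dict.keys()): keys in insertion order, first occurrences (exact for the dict convention)
def rylKeys (d : List (String × Int)) : List String :=
  PySem.List.dedup (d.map (·.1))

-- A's counting loop with break: number of leading years whose str is NOT in the set
def rylBreakCount (pred : Int → Bool) : List Int → Nat
  | [] => 0
  | y :: t => if pred y then 0 else rylBreakCount pred t + 1

def reduce_year_list (year_list : List Int) (tracks_dict : List (String × Int)) : List Int :=
  let year_list_keys := PySem.List.sorted (rylKeys tracks_dict) (fun k => k) false
  let s : PySem.Set String := year_list_keys.foldl
    (fun s key => if rylGet tracks_dict key 0 > 0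
                  then PySem.Set.add s (PySem.Str.slice key none (some 4)) else s)
    PySem.Set.empty
  let ys := PySem.List.sorted year_list (fun y => y) false
  let i : Nat := rylBreakCount (fun year => PySem.Set.contains s (PySem.Int.toStr year)) ys
  PySem.List.slice ys (some (i : Int)) none

-- ===== PORT B =====
-- tracks_dict.items() on the association list: unique keys with their first values
def rylItems (d : List (String × Int)) : List (String × Int) :=
  (rylKeys d).map (fun k => (k, rylGet d k 0))

-- B's first loop: first-position index of str(year) over the sorted years
def rylPosIndex (ys : List Int) : PySem.Dict String Int :=
  (PySem.List.enumerate ys 0).foldl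
    (fun pos p =>
      if pos.contains (PySem.Int.toStr p.2) then pos
      else pos.insert (PySem.Int.toStr p.2) p.1)
    PySem.Dict.empty

def reduce_year_list_alt (year_list : List Int) (tracks_dict : List (String × Int)) : List Int :=
  let ys := PySem.List.sorted year_list (fun y => y) false
  let n : Int := ys.length
  let pos := rylPosIndex ys
  let cut : Int := (rylItems tracks_dict).foldl
    (fun cut kv =>
      if kv.2 > 0 then min cut (pos.getD (PySem.Str.slice kv.1 none (some 4)) n) else cut)
    n
  PySem.List.slice ys (some cut) none

-- ===== PRECONDITION & SPEC =====
def Spec_reduce_year_list (year_list : List Int) (tracks_dict : List (String × Int)) (out : List Int) : Prop := out = reduce_year_list_alt year_list tracks_dict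
instance (year_list : List Int) (tracks_dict : List (String × Int)) (out : List Int) : Decidable (Spec_reduce_year_list year_list tracks_dict out) := by unfold Spec_reduce_year_list; infer_instance

-- ===== CLAIM (what is proved, stated in full; the proofs are below) =====
def Claim_equal_reduce_year_list : Prop := ∀ (year_list : List Int) (tracks_dict : List (String × Int)), Dom_reduce_year_list year_list tracks_dict → Spec_reduce_year_list year_list tracks_dict (reduce_year_list year_list tracks_dict)

-- ===== LEMMAS AND PROOFS =====

theorem rylBreakCount_le_length (p : Int → Bool) (ys : List Int) :
    rylBreakCount p ys ≤ ys.length := by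
  induction ys with
  | nil => simp [rylBreakCount]
  | cons y t ih =>
    simp only [rylBreakCount, List.length_cons]
    split_ifs <;> omega

-- B's index-building loop: looking up s with default dflt gives the first matching index
theorem getD_posFold (s : String) (t : List Int) :
    ∀ (j : Int) (d : PySem.Dict String Int) (dflt : Int),
      ((PySem.List.enumerate t j).foldl
          (fun pos p =>
            if pos.contains (PySem.Int.toStr p.2) then pos
            else pos.insert (PySem.Int.toStr p.2) p.1) d).getD s dflt
      = if d.contains s then d.getD s dflt
        else if rylBreakCount (fun y => PySem.Int.toStr y == s) t < t.length
          then j + rylBreakCount (fun y => PySem.Int.toStr y == s) t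
          else dflt := by
  induction t with
  | nil =>
    intro j d dflt
    by_cases hc : d.contains s = true
    · simp [PySem.List.enumerate_nil, hc]
    · have hc' : d.contains s = false := by revert hc; cases d.contains s <;> simp
      simp [PySem.List.enumerate_nil, rylBreakCount, hc',
        PySem.Dict.getD_of_not_contains d dflt hc']
  | cons y t ih =>
    intro j d dflt
    rw [PySem.List.enumerate_cons]
    simp only [List.foldl_cons]
    by_cases hcy : d.contains (PySem.Int.toStr y) = true
    · rw [if_pos hcy, ih (j + 1) d dflt]
      by_cases hys : PySem.Int.toStr y = s
      · subst hys
        rw [if_pos hcy, if_pos hcy]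
      · have hbc : rylBreakCount (fun y' => PySem.Int.toStr y' == s) (y :: t)
            = rylBreakCount (fun y' => PySem.Int.toStr y' == s) t + 1 := by
          simp [rylBreakCount, hys]
        rw [hbc]
        simp only [List.length_cons]
        split_ifs <;> first | rfl | (push_cast; omega)
    · rw [if_neg hcy, ih (j + 1) _ dflt]
      by_cases hys : PySem.Int.toStr y = s
      · subst hys
        rw [if_pos (by rw [PySem.Dict.contains_insert]; simp),
          PySem.Dict.getD_insert, if_pos rfl, if_neg hcy]
        simp [rylBreakCount]
      · have hbeq : (s == PySem.Int.toStr y) = false :=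
          beq_eq_false_iff_ne.mpr (Ne.symm hys)
        have hcs : (d.insert (PySem.Int.toStr y) j).contains s = d.contains s := by
          rw [PySem.Dict.contains_insert, hbeq, Bool.false_or]
        have hgd : (d.insert (PySem.Int.toStr y) j).getD s dflt = d.getD s dflt := by
          rw [PySem.Dict.getD_insert, if_neg (fun h => hys (Eq.symm h))]
        rw [hcs, hgd]
        have hbc : rylBreakCount (fun y' => PySem.Int.toStr y' == s) (y :: t)
            = rylBreakCount (fun y' => PySem.Int.toStr y' == s) t + 1 := by
          simp [rylBreakCount, hys]
        rw [hbc]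
        simp only [List.length_cons]
        split_ifs <;> first | rfl | (push_cast; omega)

-- looked up with default n = length, the index is exactly the break count
theorem getD_posIndex (ys : List Int) (s : String) :
    (rylPosIndex ys).getD s (ys.length : Int)
      = (rylBreakCount (fun y => PySem.Int.toStr y == s) ys : Int) := by
  rw [rylPosIndex, getD_posFold s ys 0 PySem.Dict.empty (ys.length : Int)]
  have hle := rylBreakCount_le_length (fun y => PySem.Int.toStr y == s) ys
  rw [if_neg (by simp [PySem.Dict.contains_empty])]
  split_ifs with h <;> omega

-- first index where a disjunction fires = min of the two first indices
theorem rylBreakCount_or (p q : Int → Bool) (ys : List Int) :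
    rylBreakCount (fun y => p y || q y) ys
      = min (rylBreakCount p ys) (rylBreakCount q ys) := by
  induction ys with
  | nil => simp [rylBreakCount]
  | cons y t ih =>
    simp only [rylBreakCount, Bool.or_eq_true]
    by_cases hp : p y
    · simp [hp]
    · by_cases hq : q y
      · simp [hp, hq]
      · simp [hp, hq, ih]

theorem rylBreakCount_false (ys : List Int) :
    rylBreakCount (fun _ => false) ys = ys.length := by
  induction ys with
  | nil => simp [rylBreakCount]
  | cons y t ih => simp [rylBreakCount, ih]

-- the dict-major min-fold = first index where ANY positive item matches
theorem fold_min_eq (ys : List Int) (items : List (String × Int)) :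
    ∀ c : Int, c ≤ (ys.length : Int) →
      items.foldl
        (fun cut kv =>
          if kv.2 > 0 then
            min cut (rylBreakCount (fun y => PySem.Int.toStr y == PySem.Str.slice kv.1 none (some 4)) ys : Int)
          else cut) c
      = min c (rylBreakCount
          (fun y => items.any (fun kv =>
            decide (kv.2 > 0) && (PySem.Int.toStr y == PySem.Str.slice kv.1 none (some 4)))) ys : Int) := by
  induction items with
  | nil =>
    intro c hc
    simp only [List.foldl_nil, List.any_nil, rylBreakCount_false]
    omega
  | cons kv rest ih =>
    intro c hc
    have hb := rylBreakCount_le_length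
      (fun y => PySem.Int.toStr y == PySem.Str.slice kv.1 none (some 4)) ys
    simp only [List.foldl_cons]
    by_cases hp : kv.2 > 0
    · rw [if_pos hp, ih _ (by omega)]
      have hfun : (fun y => (kv :: rest).any (fun kv' =>
            decide (kv'.2 > 0) && (PySem.Int.toStr y == PySem.Str.slice kv'.1 none (some 4))))
          = fun y => (PySem.Int.toStr y == PySem.Str.slice kv.1 none (some 4))
              || rest.any (fun kv' =>
                  decide (kv'.2 > 0) && (PySem.Int.toStr y == PySem.Str.slice kv'.1 none (some 4))) := by
        funext y; simp [List.any_cons, hp]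
      rw [hfun, rylBreakCount_or]
      push_cast
      omega
    · rw [if_neg hp]
      have hfun : (fun y => (kv :: rest).any (fun kv' =>
            decide (kv'.2 > 0) && (PySem.Int.toStr y == PySem.Str.slice kv'.1 none (some 4))))
          = fun y => rest.any (fun kv' =>
              decide (kv'.2 > 0) && (PySem.Int.toStr y == PySem.Str.slice kv'.1 none (some 4))) := by
        funext y; simp [List.any_cons, hp]
      rw [hfun]
      exact ih c hc

-- membership in A's fold-built set
theorem mem_foldl_add_if (p : String → Prop) [DecidablePred p] (f : String → String)
    (L : List String) (s : PySem.Set String) (x : String) :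
    (x ∈ L.foldl (fun s k => if p k then PySem.Set.add s (f k) else s) s) ↔
      x ∈ s ∨ ∃ k ∈ L, p k ∧ f k = x := by
  induction L generalizing s with
  | nil => simp
  | cons a t ih =>
    simp only [List.foldl_cons]
    rw [ih]
    by_cases hp : p a
    · simp only [if_pos hp, PySem.Set.mem_add, List.mem_cons]
      constructor
      · rintro (⟨h | rfl⟩ | ⟨k, hk, hpk, hfk⟩)
        · exact Or.inl h
        · exact Or.inr ⟨a, Or.inl rfl, hp, rfl⟩
        · exact Or.inr ⟨k, Or.inr hk, hpk, hfk⟩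
      · rintro (h | ⟨k, (rfl | hk), hpk, hfk⟩)
        · exact Or.inl (Or.inl h)
        · exact Or.inl (Or.inr hfk.symm)
        · exact Or.inr ⟨k, hk, hpk, hfk⟩
    · rw [if_neg hp]
      constructor
      · rintro (h | ⟨k, hk, hpk, hfk⟩)
        · exact Or.inl h
        · exact Or.inr ⟨k, List.mem_cons_of_mem a hk, hpk, hfk⟩
      · rintro (h | ⟨k, hk, hpk, hfk⟩)
        · exact Or.inl h
        · rcases List.mem_cons.mp hk with rfl | hk'
          · exact absurd hpk hp
          · exact Or.inr ⟨k, hk', hpk, hfk⟩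

-- A's set-membership test = B's scan over the dict items
theorem pred_eq (tracks_dict : List (String × Int)) (y : Int) :
    PySem.Set.contains
      ((PySem.List.sorted (rylKeys tracks_dict) (fun k => k) false).foldl
        (fun s key => if rylGet tracks_dict key 0 > 0
                      then PySem.Set.add s (PySem.Str.slice key none (some 4)) else s)
        PySem.Set.empty) (PySem.Int.toStr y)
    = (rylItems tracks_dict).any (fun kv =>
        decide (kv.2 > 0) && (PySem.Int.toStr y == PySem.Str.slice kv.1 none (some 4))) := by
  rw [Bool.eq_iff_iff, PySem.Set.contains_iff, List.any_eq_true]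
  rw [mem_foldl_add_if (fun k => rylGet tracks_dict k 0 > 0)
    (fun k => PySem.Str.slice k none (some 4))]
  simp only [PySem.List.mem_sorted, rylItems, List.mem_map, PySem.Set.empty,
    List.not_mem_nil, false_or, Bool.and_eq_true, decide_eq_true_eq, beq_iff_eq]
  constructor
  · rintro ⟨k, hk, hp, hfk⟩
    exact ⟨(k, rylGet tracks_dict k 0), ⟨k, hk, rfl⟩, hp, hfk.symm⟩
  · rintro ⟨kv, ⟨k, hk, rfl⟩, hp, hfk⟩
    exact ⟨k, hk, hp, hfk.symm⟩

-- ===== VERDICT (by name: the statement is the Claim_ definition above) =====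
theorem reduce_year_list_spec : Claim_equal_reduce_year_list := by
  intro year_list tracks_dict _
  unfold Spec_reduce_year_list reduce_year_list reduce_year_list_alt
  simp only []
  have hg : (fun (cut : Int) (kv : String × Int) =>
        if kv.2 > 0 then
          min cut ((rylPosIndex (PySem.List.sorted year_list (fun y => y) false)).getD
            (PySem.Str.slice kv.1 none (some 4))
            ((PySem.List.sorted year_list (fun y => y) false).length : Int))
        else cut)
      = fun cut kv =>
        if kv.2 > 0 then
          min cut (rylBreakCount (fun y => PySem.Int.toStr y == PySem.Str.slice kv.1 none (some 4))
            (PySem.List.sorted year_list (fun y => y) false) : Int)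
        else cut := by
    funext cut kv
    rw [getD_posIndex]
  rw [hg, fold_min_eq (PySem.List.sorted year_list (fun y => y) false) (rylItems tracks_dict)
    ((PySem.List.sorted year_list (fun y => y) false).length : Int) (le_refl _)]
  have hfun : (fun year => PySem.Set.contains
      ((PySem.List.sorted (rylKeys tracks_dict) (fun k => k) false).foldl
        (fun s key => if rylGet tracks_dict key 0 > 0
                      then PySem.Set.add s (PySem.Str.slice key none (some 4)) else s)
        PySem.Set.empty) (PySem.Int.toStr year))
      = (fun y => (rylItems tracks_dict).any (fun kv =>
          decide (kv.2 > 0) && (PySem.Int.toStr y == PySem.Str.slice kv.1 none (some 4)))) :=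
    funext (pred_eq tracks_dict)
  rw [hfun]
  have := rylBreakCount_le_length
    (fun y => (rylItems tracks_dict).any (fun kv =>
      decide (kv.2 > 0) && (PySem.Int.toStr y == PySem.Str.slice kv.1 none (some 4))))
    (PySem.List.sorted year_list (fun y => y) false)
  congr 2
  omega
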